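-- pv_equiv track=rewrite | github.com/daniel-reich/ubiquitous-fiesta | PirFJDfGk4vpsdkeE_22.py | help_bobby
-- ===== SOURCE A (Python) =====
-- def help_bobby(size):
--     array=[[0 for _ in range(size)]for _ in range(size)]
--     row=0
--     for column in range(size):
--         array[column][row]=1
--         array[size-1-column][row]=1
--         row+=1
--     return array
-- ===== SOURCE B (Python) =====
-- def help_bobby(size):
--     return [[1 if i == j or i + j == size - 1 else 0 for j in range(size)] for i in range(size)]
-- ===== Notes on version B (the rewrite author's own statement) =====
-- stated objective: simpler
-- what changed: B builds each cell directly with the predicate i==j or i+j==size-1 in a single nested comprehension, instead of allocating a zero matrix and overwriting the two diagonals in a second mutating pass.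
import Mathlib
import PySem

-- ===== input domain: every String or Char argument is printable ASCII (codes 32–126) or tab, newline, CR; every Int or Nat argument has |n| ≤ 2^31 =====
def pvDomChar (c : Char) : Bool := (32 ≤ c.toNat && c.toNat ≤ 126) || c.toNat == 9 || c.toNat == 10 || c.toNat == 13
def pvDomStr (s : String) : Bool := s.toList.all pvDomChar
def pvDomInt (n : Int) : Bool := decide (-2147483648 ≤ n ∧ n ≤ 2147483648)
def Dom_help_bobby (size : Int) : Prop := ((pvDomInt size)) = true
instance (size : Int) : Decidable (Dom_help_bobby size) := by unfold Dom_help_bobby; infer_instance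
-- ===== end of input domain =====

-- B builds each cell directly with the predicate i = j ∨ i + j = size - 1 in one nested
-- comprehension, instead of A's zero matrix plus a second diagonal-marking mutation pass (simpler).

-- ===== PORT A =====
-- in-place assignment array[r][c] = v; in A both indices are always nonnegative and in range
def pvSetCell (a : List (List Int)) (r c v : Int) : List (List Int) :=
  a.set r.toNat ((a.getD r.toNat []).set c.toNat v)

def help_bobby (size : Int) : List (List Int) :=
  let array : List (List Int) :=
    (PySem.List.pyRange 0 size 1).map (fun _ => (PySem.List.pyRange 0 size 1).map (fun _ => (0 : Int)))
  let res := (PySem.List.pyRange 0 size 1).foldl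
    (fun (st : List (List Int) × Int) column =>
      let a1 := pvSetCell st.1 column st.2 1
      let a2 := pvSetCell a1 (size - 1 - column) st.2 1
      (a2, st.2 + 1)) (array, 0)
  res.1

-- ===== PORT B =====
def help_bobby_alt (size : Int) : List (List Int) :=
  (PySem.List.pyRange 0 size 1).map (fun i =>
    (PySem.List.pyRange 0 size 1).map (fun j =>
      if i = j ∨ i + j = size - 1 then (1 : Int) else 0))

-- ===== PRECONDITION & SPEC =====
def Spec_help_bobby (size : Int) (out : List (List Int)) : Prop := out = help_bobby_alt size
instance (size : Int) (out : List (List Int)) : Decidable (Spec_help_bobby size out) := by unfold Spec_help_bobby; infer_instance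

-- ===== CLAIM (what is proved, stated in full; the proofs are below) =====
def Claim_equal_help_bobby : Prop := ∀ (size : Int), Dom_help_bobby size → Spec_help_bobby size (help_bobby size)

-- ===== LEMMAS AND PROOFS =====

-- cell accessor (proofs only)
def pvGet0 (a : List (List Int)) (i j : Nat) : Int := (a.getD i []).getD j 0

-- A's per-column step with the row counter fused (row = column in A's loop)
def pvStep (size : Int) (a : List (List Int)) (c : Int) : List (List Int) :=
  pvSetCell (pvSetCell a c c 1) (size - 1 - c) c 1

def pvZeros (size : Int) : List (List Int) :=
  (PySem.List.pyRange 0 size 1).map (fun _ => (PySem.List.pyRange 0 size 1).map (fun _ => (0 : Int)))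

theorem length_setCell (a : List (List Int)) (r c v : Int) :
    (pvSetCell a r c v).length = a.length := by
  simp [pvSetCell]

theorem rowlen_setCell (a : List (List Int)) (n : Nat) (hrow : ∀ row ∈ a, row.length = n)
    (r c v : Int) (hr : r.toNat < a.length) :
    ∀ row ∈ pvSetCell a r c v, row.length = n := by
  intro row hmem
  unfold pvSetCell at hmem
  rcases List.mem_or_eq_of_mem_set hmem with h | h
  · exact hrow _ h
  · subst h
    rw [List.length_set, List.getD_eq_getElem?_getD, List.getElem?_eq_getElem hr]
    exact hrow _ (List.getElem_mem hr)

theorem get0_setCell (a : List (List Int)) (n : Nat) (hlen : a.length = n)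
    (hrow : ∀ row ∈ a, row.length = n) (r c v : Int)
    (hrn : r.toNat < n) (hcn : c.toNat < n) (i j : Nat) :
    pvGet0 (pvSetCell a r c v) i j = if i = r.toNat ∧ j = c.toNat then v else pvGet0 a i j := by
  have hrA : r.toNat < a.length := by omega
  have hrowlen : (a[r.toNat]?.getD []).length = n := by
    rw [List.getElem?_eq_getElem hrA]
    exact hrow _ (List.getElem_mem hrA)
  unfold pvGet0 pvSetCell
  simp only [List.getD_eq_getElem?_getD, List.getElem?_set]
  by_cases hir : r.toNat = i
  · rw [if_pos hir, if_pos (by omega)]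
    simp only [Option.getD_some, List.getElem?_set]
    by_cases hjc : c.toNat = j
    · rw [if_pos hjc, if_pos (by omega), if_pos (by omega)]
      simp
    · rw [if_neg hjc, if_neg (by omega), ← hir]
  · rw [if_neg hir, if_neg (by omega)]

-- fuse A's (array, row) state: over range(r, b) started at row r, the row counter equals the column
theorem pvFold_pair (size : Int) :
    ∀ (k : Nat) (b r : Int) (a : List (List Int)), (b - r).toNat = k →
      (PySem.List.pyRange r b 1).foldl
        (fun (st : List (List Int) × Int) column =>
          let a1 := pvSetCell st.1 column st.2 1
          let a2 := pvSetCell a1 (size - 1 - column) st.2 1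
          (a2, st.2 + 1)) (a, r)
      = ((PySem.List.pyRange r b 1).foldl (pvStep size) a, r + (PySem.List.pyRange r b 1).length) := by
  intro k
  induction k with
  | zero =>
    intro b r a hk
    rw [PySem.List.pyRange_one_eq_nil (by omega)]
    simp
  | succ k ih =>
    intro b r a hk
    rw [PySem.List.pyRange_one_cons (by omega)]
    simp only [List.foldl_cons, List.length_cons]
    rw [ih b (r + 1) _ (by omega)]
    rw [Prod.mk.injEq]
    exact ⟨rfl, by push_cast; ring⟩

theorem zeros_shape (size : Int) :
    (pvZeros size).length = size.toNat ∧ ∀ row ∈ pvZeros size, row.length = size.toNat := by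
  constructor
  · simp [pvZeros, PySem.List.length_pyRange_one]
  · intro row hmem
    simp only [pvZeros, List.mem_map] at hmem
    obtain ⟨_, _, h⟩ := hmem
    rw [← h]
    simp [PySem.List.length_pyRange_one]

theorem get0_zeros (size : Int) (i j : Nat) : pvGet0 (pvZeros size) i j = 0 := by
  unfold pvGet0 pvZeros
  simp only [List.getD_eq_getElem?_getD, List.getElem?_map]
  rcases h : (PySem.List.pyRange 0 size 1)[i]? with _ | x
  · simp
  · simp only [Option.map_some, Option.getD_some, List.getElem?_map]
    rcases h2 : (PySem.List.pyRange 0 size 1)[j]? with _ | y <;> simp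

-- the invariant of A's loop: after m columns, cell (i,j) is 1 iff j < m and (i,j) is diagonal
theorem pvInv (n : Nat) (m : Nat) (hm : m ≤ n) :
    ((PySem.List.pyRange 0 (m : Int) 1).foldl (pvStep (n : Int)) (pvZeros (n : Int))).length = n ∧
    (∀ row ∈ (PySem.List.pyRange 0 (m : Int) 1).foldl (pvStep (n : Int)) (pvZeros (n : Int)), row.length = n) ∧
    (∀ i j : Nat, pvGet0 ((PySem.List.pyRange 0 (m : Int) 1).foldl (pvStep (n : Int)) (pvZeros (n : Int))) i j
      = if j < m ∧ (i = j ∨ i + j + 1 = n) then 1 else 0) := by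
  induction m with
  | zero =>
    rw [PySem.List.pyRange_one_eq_nil (by omega)]
    simp only [List.foldl_nil]
    refine ⟨by simpa using (zeros_shape (n : Int)).1, by simpa using (zeros_shape (n : Int)).2, ?_⟩
    intro i j
    rw [get0_zeros]
    simp
  | succ m ih =>
    have ih := ih (by omega)
    obtain ⟨hlen, hrow, hget⟩ := ih
    have hstep : (PySem.List.pyRange 0 ((m : Int) + 1) 1).foldl (pvStep (n : Int)) (pvZeros (n : Int))
        = pvStep (n : Int) ((PySem.List.pyRange 0 (m : Int) 1).foldl (pvStep (n : Int)) (pvZeros (n : Int))) (m : Int) := by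
      rw [PySem.List.pyRange_one_succ_right (by omega)]
      simp
    have hmn : m < n := by omega
    have h1 : ((m : Int)).toNat = m := by omega
    have h2 : (((n : Int) - 1 - (m : Int))).toNat = n - 1 - m := by omega
    set F := (PySem.List.pyRange 0 (m : Int) 1).foldl (pvStep (n : Int)) (pvZeros (n : Int)) with hF
    have push : ((m : Int) + 1) = ((m + 1 : Nat) : Int) := by push_cast; ring
    rw [← push]
    have hlen1 : (pvSetCell F (m : Int) (m : Int) 1).length = n := by
      rw [length_setCell]; exact hlen
    have hrow1 : ∀ row ∈ pvSetCell F (m : Int) (m : Int) 1, row.length = n := by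
      apply rowlen_setCell _ _ hrow
      omega
    refine ⟨?_, ?_, ?_⟩
    · rw [hstep]; unfold pvStep; rw [length_setCell, length_setCell]; exact hlen
    · rw [hstep]; unfold pvStep
      apply rowlen_setCell _ _ hrow1
      rw [hlen1]; omega
    · intro i j
      rw [hstep]; unfold pvStep
      rw [get0_setCell _ n hlen1 hrow1 _ _ _ (by omega) (by omega)]
      rw [get0_setCell _ n hlen hrow _ _ _ (by omega) (by omega)]
      rw [hget i j, h1, h2]
      split_ifs <;> omega

-- pointwise value of B's comprehension
theorem get0_alt (size : Int) (i j : Nat) (hi : i < size.toNat) (hj : j < size.toNat) :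
    pvGet0 (help_bobby_alt size) i j
      = if i = j ∨ (i : Int) + (j : Int) + 1 = size then 1 else 0 := by
  unfold pvGet0 help_bobby_alt
  simp only [List.getD_eq_getElem?_getD, List.getElem?_map]
  rw [PySem.List.getElem?_pyRange_one, if_pos (by omega)]
  simp only [Option.map_some, Option.getD_some, List.getElem?_map]
  rw [PySem.List.getElem?_pyRange_one, if_pos (by omega)]
  simp only [Option.map_some, Option.getD_some]
  have hiff : ((0 : Int) + (i : Int) = 0 + (j : Int) ∨ (0 : Int) + (i : Int) + ((0 : Int) + (j : Int)) = size - 1)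
      ↔ (i = j ∨ (i : Int) + (j : Int) + 1 = size) := by omega
  rw [if_congr hiff rfl rfl]

-- matrix equality from shape + pointwise values
theorem eq_of_get0 (a b : List (List Int)) (n : Nat)
    (ha : a.length = n) (hb : b.length = n)
    (har : ∀ row ∈ a, row.length = n) (hbr : ∀ row ∈ b, row.length = n)
    (h : ∀ i j : Nat, i < n → j < n → pvGet0 a i j = pvGet0 b i j) : a = b := by
  apply List.ext_getElem (by omega)
  intro i hi hi'
  have hrA : a[i].length = n := har _ (List.getElem_mem hi)
  have hrB : b[i].length = n := hbr _ (List.getElem_mem hi')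
  apply List.ext_getElem (by omega)
  intro j hj hj'
  have := h i j (by omega) (by omega)
  unfold pvGet0 at this
  simp only [List.getD_eq_getElem?_getD] at this
  rw [List.getElem?_eq_getElem hi, List.getElem?_eq_getElem hi'] at this
  simp only [Option.getD_some] at this
  rw [List.getElem?_eq_getElem hj, List.getElem?_eq_getElem hj'] at this
  simpa using this

theorem alt_shape (size : Int) :
    (help_bobby_alt size).length = size.toNat ∧
    ∀ row ∈ help_bobby_alt size, row.length = size.toNat := by
  constructor
  · simp [help_bobby_alt, PySem.List.length_pyRange_one]
  · intro row hmem
    simp only [help_bobby_alt, List.mem_map] at hmem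
    obtain ⟨_, _, h⟩ := hmem
    rw [← h]
    simp [PySem.List.length_pyRange_one]

theorem help_bobby_eq_alt (size : Int) : help_bobby size = help_bobby_alt size := by
  by_cases hpos : 0 < size
  · set n := size.toNat with hn
    have hsz : size = (n : Int) := by omega
    have hA : help_bobby size
        = ((PySem.List.pyRange 0 size 1).foldl
            (fun (st : List (List Int) × Int) column =>
              let a1 := pvSetCell st.1 column st.2 1
              let a2 := pvSetCell a1 (size - 1 - column) st.2 1
              (a2, st.2 + 1)) (pvZeros size, 0)).1 := rfl
    rw [hA, pvFold_pair size (size - 0).toNat size 0 _ rfl]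
    have hfold : (PySem.List.pyRange 0 size 1).foldl (pvStep size) (pvZeros size)
        = (PySem.List.pyRange 0 ((n : Nat) : Int) 1).foldl (pvStep ((n : Nat) : Int)) (pvZeros ((n : Nat) : Int)) := by
      rw [← hsz]
    obtain ⟨hlen, hrow, hget⟩ := pvInv n n (le_refl n)
    show (PySem.List.pyRange 0 size 1).foldl (pvStep size) (pvZeros size) = help_bobby_alt size
    rw [hfold]
    apply eq_of_get0 _ _ n hlen ((alt_shape size).1.trans (by omega)) hrow
      (fun row hm => ((alt_shape size).2 row hm).trans (by omega))
    intro i j hi hj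
    rw [hget i j, get0_alt size i j (by omega) (by omega)]
    split_ifs <;> omega
  · have hnil : PySem.List.pyRange 0 size 1 = [] := PySem.List.pyRange_one_eq_nil (by omega)
    unfold help_bobby help_bobby_alt
    rw [hnil]
    simp

-- ===== VERDICT (by name: the statement is the Claim_ definition above) =====
theorem help_bobby_spec : Claim_equal_help_bobby := by
  intro size _
  unfold Spec_help_bobby
  exact help_bobby_eq_alt size
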